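-- pv_equiv track=rewrite | github.com/jk-jung/problem-solving | codewars/5kyu/5_Paginating a huge book.py | page_digits
-- ===== SOURCE A (Python) =====
-- def page_digits(n):
--     r = 0
--     m = 9
--     while n > 0:
--         r += max(n, 0)
--         n -= m
--         m *= 10
--     return r
-- ===== SOURCE B (Python) =====
-- def page_digits(n):
--     if n <= 0:
--         return 0
--     L = len(str(n))
--     return (n + 1) * L - (10 ** L - 1) // 9
-- ===== Notes on version B (the rewrite author's own statement) =====
-- stated objective: simpler
-- what changed: Replaced A's telescoping while-loop accumulation with a direct closed-form expression: digit count times pages-plus-one minus the repunit correction term, computed by integer division, with a guard for nonpositive page counts.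
import Mathlib
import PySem

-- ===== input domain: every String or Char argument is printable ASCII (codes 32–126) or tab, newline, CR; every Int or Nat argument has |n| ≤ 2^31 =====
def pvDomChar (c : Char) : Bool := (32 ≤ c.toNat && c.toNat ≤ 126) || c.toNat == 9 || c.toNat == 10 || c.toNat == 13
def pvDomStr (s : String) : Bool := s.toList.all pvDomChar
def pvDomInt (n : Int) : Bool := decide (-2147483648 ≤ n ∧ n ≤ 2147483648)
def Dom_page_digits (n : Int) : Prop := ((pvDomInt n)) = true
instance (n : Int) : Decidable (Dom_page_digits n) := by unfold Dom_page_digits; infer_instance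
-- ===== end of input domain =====

-- B replaces A's telescoping while-loop by a closed-form expression over the digit count of n: simpler, no loop.


-- ===== PORT A =====
-- the while loop of A; the positivity of m is carried as a proof so the recursion terminates
def pdLoop (n m r : Int) (hm : 0 < m) : Int :=
  if _h : 0 < n then pdLoop (n - m) (m * 10) (r + max n 0) (by omega)
  else r
termination_by n.toNat
decreasing_by omega

def page_digits (n : Int) : Int := pdLoop n 9 0 (by norm_num)

-- ===== PORT B =====
-- 10 ** L is ported as (10:Int) ^ L.toNat: in Source B this line only runs with L = len(str(n)) ≥ 1, where it is exact
def page_digits_alt (n : Int) : Int :=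
  if n ≤ 0 then 0
  else
    let L : Int := PySem.Str.len (PySem.Int.toStr n)
    (n + 1) * L - PySem.Int.floordiv ((10 : Int) ^ L.toNat - 1) 9

-- ===== PRECONDITION & SPEC =====
def Spec_page_digits (n : Int) (out : Int) : Prop := out = page_digits_alt n
instance (n : Int) (out : Int) : Decidable (Spec_page_digits n out) := by unfold Spec_page_digits; infer_instance

-- ===== CLAIM (what is proved, stated in full; the proofs are below) =====
def Claim_equal_page_digits : Prop := ∀ (n : Int), Dom_page_digits n → Spec_page_digits n (page_digits n)

-- ===== LEMMAS AND PROOFS =====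

-- S d = 1 + 10 + … + 10^(d-1)
def pdS (d : Nat) : Int := ∑ j ∈ Finset.range d, (10 : Int) ^ j

lemma pdS_nonneg (d : Nat) : 0 ≤ pdS d := by
  unfold pdS; positivity

lemma pdS_succ (d : Nat) : pdS (d + 1) = 10 * pdS d + 1 := by
  unfold pdS
  rw [Finset.sum_range_succ' (fun j => (10 : Int) ^ j) d, Finset.mul_sum]
  simp only [pow_zero]
  congr 1
  exact Finset.sum_congr rfl fun j _ => by ring

lemma nine_mul_pdS (d : Nat) : 9 * pdS d = 10 ^ d - 1 := by
  induction d with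
  | zero => simp [pdS]
  | succ d ih => rw [pdS_succ]; rw [pow_succ]; linarith

lemma pdLoop_sum (T : Nat) : ∀ (n m r : Int) (hm : 0 < m), n ≤ m * pdS T →
    pdLoop n m r hm = r + ∑ j ∈ Finset.range T, max (n - m * pdS j) 0 := by
  induction T with
  | zero =>
    intro n m r hm hle
    simp [pdS] at hle
    rw [pdLoop]
    simp
    omega
  | succ T ih =>
    intro n m r hm hle
    rw [pdLoop]
    by_cases h : 0 < n
    · simp only [h, dif_pos]
      have hle' : n - m ≤ (m * 10) * pdS T := by
        rw [pdS_succ] at hle; nlinarith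
      rw [ih (n - m) (m * 10) (r + max n 0) (by omega) hle']
      rw [Finset.sum_range_succ' (fun j => max (n - m * pdS j) 0) T]
      have : ∀ j, n - m - m * 10 * pdS j = n - m * pdS (j + 1) := by
        intro j; rw [pdS_succ]; ring
      simp only [this]
      have h0 : pdS 0 = 0 := by simp [pdS]
      rw [h0, mul_zero, sub_zero]
      ring
    · rw [dif_neg h]
      have : ∀ j ∈ Finset.range (T + 1), max (n - m * pdS j) 0 = 0 := by
        intro j _
        have := pdS_nonneg j
        have : 0 ≤ m * pdS j := by positivity
        omega
      rw [Finset.sum_congr rfl this]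
      simp

-- exact length of Nat.toDigits 10
lemma toDigitsCore_len10 : ∀ (f n : Nat) (l : List Char), n < f →
    (Nat.toDigitsCore 10 f n l).length = Nat.log 10 n + 1 + l.length := by
  intro f
  induction f with
  | zero => intro n l h; omega
  | succ f ih =>
    intro n l h
    rw [Nat.toDigitsCore]
    by_cases hx : n / 10 = 0
    · have hn : n < 10 := by omega
      have hlog : Nat.log 10 n = 0 := Nat.log_eq_zero_iff.mpr (Or.inl hn)
      simp [hx, hlog]
      omega
    · simp only [hx, if_false]
      have h10 : 10 ≤ n := by omega
      have hrec : n / 10 < f := by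
        have : n / 10 < n := Nat.div_lt_self (by omega) (by norm_num)
        omega
      rw [ih (n / 10) (Nat.digitChar (n % 10) :: l) hrec]
      have hlog : Nat.log 10 n = Nat.log 10 (n / 10) + 1 := by
        rw [Nat.log_div_base]
        have : 0 < Nat.log 10 n := Nat.log_pos (by norm_num) h10
        omega
      rw [hlog]
      simp
      omega

lemma toDigits_len10 (n : Nat) : (Nat.toDigits 10 n).length = Nat.log 10 n + 1 := by
  have := toDigitsCore_len10 (n + 1) n [] (by omega)
  simpa [Nat.toDigits] using this

-- main equality for positive n
lemma page_digits_eq_alt_pos (n : Int) (hn : 0 < n) : page_digits n = page_digits_alt n := by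
  set N : Nat := n.toNat with hN
  have hNpos : N ≠ 0 := by omega
  have hnN : (N : Int) = n := Int.toNat_of_nonneg hn.le
  set d : Nat := Nat.log 10 N + 1 with hd
  have hub : n < (10 : Int) ^ d := by
    have h1 := Nat.lt_pow_succ_log_self (b := 10) (by norm_num) N
    calc n = (N : Int) := hnN.symm
      _ < ((10 ^ (Nat.log 10 N + 1) : Nat) : Int) := by exact_mod_cast h1
      _ = (10 : Int) ^ d := by push_cast; rw [hd]
  have hlb : (10 : Int) ^ (Nat.log 10 N) ≤ n := by
    have h1 := Nat.pow_log_le_self 10 hNpos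
    calc (10 : Int) ^ (Nat.log 10 N) = ((10 ^ (Nat.log 10 N) : Nat) : Int) := by push_cast; rfl
      _ ≤ (N : Int) := by exact_mod_cast h1
      _ = n := hnN
  -- A's side: the loop telescopes into a sum whose terms are all positive
  have hA : page_digits n = ∑ j ∈ Finset.range d, (n + 1 - 10 ^ j) := by
    unfold page_digits
    have h9d := nine_mul_pdS d
    rw [pdLoop_sum d n 9 0 (by norm_num) (by omega)]
    rw [zero_add]
    apply Finset.sum_congr rfl
    intro j hj
    rw [Finset.mem_range] at hj
    have hj' : j ≤ Nat.log 10 N := by omega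
    have hpow : (10 : Int) ^ j ≤ 10 ^ (Nat.log 10 N) :=
      pow_le_pow_right₀ (by norm_num) hj'
    have h9 : (9 : Int) * pdS j = 10 ^ j - 1 := nine_mul_pdS j
    omega
  -- B's side
  have hlen : PySem.Str.len (PySem.Int.toStr n) = (d : Int) := by
    rw [PySem.Str.len_eq, PySem.Int.toList_toStr]
    unfold PySem.Int.toChars
    rw [if_neg (by omega)]
    rw [toDigits_len10]

  have hB : page_digits_alt n = (n + 1) * (d : Int) - pdS d := by
    unfold page_digits_alt
    rw [if_neg (by omega)]
    simp only [hlen]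
    have ht : ((d : Int)).toNat = d := by simp
    rw [ht]
    have h9 : (10 : Int) ^ d - 1 = 9 * pdS d := (nine_mul_pdS d).symm
    rw [h9, PySem.Int.floordiv_eq_ediv_of_pos (by norm_num),
        Int.mul_ediv_cancel_left _ (by norm_num)]
  rw [hA, hB]
  rw [Finset.sum_sub_distrib, Finset.sum_const, Finset.card_range, nsmul_eq_mul]
  unfold pdS
  ring

-- ===== VERDICT (by name: the statement is the Claim_ definition above) =====
theorem page_digits_spec : Claim_equal_page_digits := by
  intro n _
  unfold Spec_page_digits
  by_cases hn : 0 < n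
  · exact page_digits_eq_alt_pos n hn
  · unfold page_digits page_digits_alt
    rw [pdLoop]
    simp [hn]
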